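-- pv_equiv track=rewrite | github.com/PrayushiFaldu/COL772 | Assignment_2/Solution/Submission/train.py | normalise_words
-- ===== SOURCE A (Python) =====
-- def normalise_words(sent):
-- 	res = []
-- 	for word in sent.split(" "):
-- 		temp = ""
-- 		for idx,char in enumerate(word):
-- 			if(idx < 2):
-- 				temp += char
-- 			else:
-- 				if(not (char.lower() == word[idx-1].lower() and char.lower() == word[idx-2].lower())):
-- 					temp += char
-- 		res.append(temp)
-- 	return " ".join(res)
-- ===== SOURCE B (Python) =====
-- def normalise_words(sent):
--     out_words = []
--     for word in sent.split(" "):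
--         parts = []
--         i = 0
--         n = len(word)
--         while i < n:
--             c = word[i].lower()
--             j = i
--             while j < n and word[j].lower() == c:
--                 j += 1
--             parts.append(word[i:min(j, i + 2)])
--             i = j
--         out_words.append("".join(parts))
--     return " ".join(out_words)
-- ===== Notes on version B (the rewrite author's own statement) =====
-- stated objective: alternative
-- what changed: A tests each character against the two previous positions of the word; B instead splits each word into maximal case-insensitive runs of equal characters and keeps the first two characters of every run.
import Mathlib
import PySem

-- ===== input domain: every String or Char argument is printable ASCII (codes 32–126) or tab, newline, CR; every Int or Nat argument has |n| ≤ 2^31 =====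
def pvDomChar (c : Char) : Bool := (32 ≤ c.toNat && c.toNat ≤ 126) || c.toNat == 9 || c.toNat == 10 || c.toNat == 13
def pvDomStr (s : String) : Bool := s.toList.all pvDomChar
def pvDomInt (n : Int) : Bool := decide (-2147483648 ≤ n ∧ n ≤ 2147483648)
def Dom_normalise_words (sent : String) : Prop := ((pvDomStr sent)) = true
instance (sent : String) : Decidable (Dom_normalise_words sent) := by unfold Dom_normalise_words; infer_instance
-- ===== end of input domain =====

-- B replaces A's per-index look-back test by grouping each word into maximal
-- case-insensitive runs and keeping the first two characters of each run
-- (objective: alternative algorithm, same cost).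

-- ===== PORT A =====
-- the inner 'for idx,char in enumerate(word)' loop of A, state = temp (as List Char)
def wordLoopA (w : List Char) (temp : List Char) : List (Int × Char) → List Char
  | [] => temp
  | (idx, ch) :: rest =>
      if idx < 2 then wordLoopA w (temp ++ [ch]) rest
      else
        match PySem.List.pyGet? w (idx - 1), PySem.List.pyGet? w (idx - 2) with
        | some a, some b =>
            if ¬ (PySem.Chars.lowerChar ch = PySem.Chars.lowerChar a ∧
                  PySem.Chars.lowerChar ch = PySem.Chars.lowerChar b)
            then wordLoopA w (temp ++ [ch]) rest
            else wordLoopA w temp rest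
        | _, _ => wordLoopA w temp rest  -- unreachable: enumerate keeps 0 ≤ idx < len w

def normalise_words (sent : String) : String :=
  String.ofList (PySem.Chars.join [' ']
    ((PySem.Chars.splitOn sent.toList [' ']).map
      (fun word => wordLoopA word [] (PySem.List.enumerate word 0))))

-- ===== PORT B =====
-- length of the maximal prefix run whose characters lower-case to lc (B's inner while)
def runLenB (lc : Char) : List Char → Nat
  | [] => 0
  | d :: rest => if PySem.Chars.lowerChar d = lc then runLenB lc rest + 1 else 0

-- B's outer while loop over one word: slice off each run, keep its first two chars
def wordB : List Char → List Char
  | [] => []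
  | c :: t =>
      let k := runLenB (PySem.Chars.lowerChar c) (c :: t)
      (c :: t).take (min k 2) ++ wordB ((c :: t).drop k)
termination_by w => w.length
decreasing_by
  have h : runLenB (PySem.Chars.lowerChar c) (c :: t) = runLenB (PySem.Chars.lowerChar c) t + 1 := by
    simp [runLenB]
  simp only [h, List.length_drop, List.length_cons]
  omega

def normalise_words_alt (sent : String) : String :=
  String.ofList (PySem.Chars.join [' ']
    ((PySem.Chars.splitOn sent.toList [' ']).map (fun word => wordB word)))

-- ===== PRECONDITION & SPEC =====
def Spec_normalise_words (sent : String) (out : String) : Prop := out = normalise_words_alt sent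
instance (sent : String) (out : String) : Decidable (Spec_normalise_words sent out) := by unfold Spec_normalise_words; infer_instance

-- ===== CLAIM (what is proved, stated in full; the proofs are below) =====
def Claim_equal_normalise_words : Prop := ∀ (sent : String), Dom_normalise_words sent → Spec_normalise_words sent (normalise_words sent)

-- ===== LEMMAS AND PROOFS =====

lemma wordB_nil : wordB [] = [] := by rw [wordB]

lemma wordB_cons (c : Char) (t : List Char) : wordB (c :: t) =
    (c :: t).take (min (runLenB (PySem.Chars.lowerChar c) (c :: t)) 2) ++
      wordB ((c :: t).drop (runLenB (PySem.Chars.lowerChar c) (c :: t))) := by rw [wordB]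

-- middle-man: keep a char unless both preceding characters lower-case to the same letter
def specC : Option Char → Option Char → List Char → List Char
  | _, _, [] => []
  | p2, p1, c :: rest =>
      match p1, p2 with
      | some a, some b =>
          if PySem.Chars.lowerChar c = PySem.Chars.lowerChar a ∧
             PySem.Chars.lowerChar c = PySem.Chars.lowerChar b
          then specC p1 (some c) rest
          else c :: specC p1 (some c) rest
      | _, _ => c :: specC p1 (some c) rest

lemma wordLoopA_eq_specC : ∀ (s pre temp : List Char),
    wordLoopA (pre ++ s) temp (PySem.List.enumerate s (pre.length : Int)) =
      temp ++ specC pre.dropLast.getLast? pre.getLast? s := by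
  intro s
  induction s with
  | nil => intro pre temp; simp [wordLoopA, specC, PySem.List.enumerate]
  | cons c rest ih =>
    intro pre temp
    rw [PySem.List.enumerate_cons]
    have h2 : pre ++ c :: rest = (pre ++ [c]) ++ rest := by simp
    have h3 : ((pre.length : Int) + 1) = (((pre ++ [c]).length : Nat) : Int) := by simp
    have hrw : ∀ t : List Char,
        wordLoopA (pre ++ c :: rest) t (PySem.List.enumerate rest ((pre.length : Int) + 1)) =
          t ++ specC pre.getLast? (some c) rest := by
      intro t
      rw [h2, h3, ih (pre ++ [c]) t]
      simp
    by_cases hlen : pre.length < 2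
    · -- idx < 2: char kept unconditionally; p1 or p2 is none so specC also keeps
      have hA : wordLoopA (pre ++ c :: rest) temp
          (((pre.length : Int), c) :: PySem.List.enumerate rest ((pre.length : Int) + 1)) =
          wordLoopA (pre ++ c :: rest) (temp ++ [c])
            (PySem.List.enumerate rest ((pre.length : Int) + 1)) := by
        simp only [wordLoopA]
        rw [if_pos (by exact_mod_cast hlen)]
      rw [hA, hrw (temp ++ [c])]
      -- specC keeps c since pre.length < 2 means p1 = none or p2 = none
      rcases (by omega : pre.length = 0 ∨ pre.length = 1) with h0 | h1
      · have : pre = [] := by cases pre with | nil => rfl | cons _ _ => simp at h0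
        subst this
        simp [specC]
      · have hd : pre.dropLast = [] := by
          cases pre with
          | nil => rfl
          | cons x xs =>
            have : xs = [] := by cases xs with | nil => rfl | cons _ _ => simp at h1
            subst this; rfl
        rw [show specC pre.dropLast.getLast? pre.getLast? (c :: rest) =
              c :: specC pre.getLast? (some c) rest from ?_]
        · simp
        · cases hg : pre.getLast? with
          | none => simp [specC]
          | some a => rw [hd]; simp [specC]
    · -- idx ≥ 2: look-backs hit pre's last two characters
      rw [Nat.not_lt] at hlen
      obtain ⟨a, ha⟩ : ∃ a, pre.getLast? = some a := by
        cases hg : pre.getLast? with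
        | none =>
          exfalso
          have := List.getLast?_eq_none_iff.mp hg
          subst this; simp at hlen
        | some a => exact ⟨a, rfl⟩
      obtain ⟨b, hb⟩ : ∃ b, pre.dropLast.getLast? = some b := by
        cases hg : pre.dropLast.getLast? with
        | none =>
          exfalso
          have h0 := List.getLast?_eq_none_iff.mp hg
          have : pre.dropLast.length = 0 := by rw [h0]; rfl
          simp at this; omega
        | some b => exact ⟨b, rfl⟩
      have hg1 : PySem.List.pyGet? (pre ++ c :: rest) ((pre.length : Int) - 1) = some a := by
        have h1 : ((pre.length : Int) - 1) = ((pre.length - 1 : Nat) : Int) := by omega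
        rw [h1, PySem.List.pyGet?_natCast, List.getElem?_append_left (by omega)]
        rw [List.getLast?_eq_getElem?] at ha
        exact ha
      have hg2 : PySem.List.pyGet? (pre ++ c :: rest) ((pre.length : Int) - 2) = some b := by
        have h1 : ((pre.length : Int) - 2) = ((pre.length - 2 : Nat) : Int) := by omega
        rw [h1, PySem.List.pyGet?_natCast, List.getElem?_append_left (by omega)]
        have hdl : pre.dropLast.getLast? = pre.dropLast[pre.length - 2]? := by
          rw [List.getLast?_eq_getElem?]
          congr 1
          simp
          omega
        rw [hdl] at hb
        rw [← hb, List.getElem?_dropLast]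
        simp [show pre.length - 2 < pre.length - 1 by omega]
      have hidx : ¬ ((pre.length : Int) < 2) := by exact_mod_cast (by omega : ¬ (pre.length < 2))
      have hA : wordLoopA (pre ++ c :: rest) temp
          (((pre.length : Int), c) :: PySem.List.enumerate rest ((pre.length : Int) + 1)) =
          (if ¬ (PySem.Chars.lowerChar c = PySem.Chars.lowerChar a ∧
                 PySem.Chars.lowerChar c = PySem.Chars.lowerChar b)
           then wordLoopA (pre ++ c :: rest) (temp ++ [c])
                  (PySem.List.enumerate rest ((pre.length : Int) + 1))
           else wordLoopA (pre ++ c :: rest) temp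
                  (PySem.List.enumerate rest ((pre.length : Int) + 1))) := by
        simp only [wordLoopA, if_neg hidx, hg1, hg2]
      rw [hA, ha, hb]
      by_cases hcond : PySem.Chars.lowerChar c = PySem.Chars.lowerChar a ∧
                       PySem.Chars.lowerChar c = PySem.Chars.lowerChar b
      · rw [if_neg (by simpa using hcond), hrw temp, ha]
        rw [show specC (some b) (some a) (c :: rest) = specC (some a) (some c) rest from by
          simp only [specC]; rw [if_pos hcond]]
      · rw [if_pos hcond, hrw (temp ++ [c]), ha]
        rw [show specC (some b) (some a) (c :: rest) = c :: specC (some a) (some c) rest from by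
          simp only [specC]; rw [if_neg hcond]]
        simp

lemma runLenB_cons (lc : Char) (d : Char) (t : List Char) :
    runLenB lc (d :: t) = if PySem.Chars.lowerChar d = lc then runLenB lc t + 1 else 0 := rfl

lemma runLenB_head_ne (lc : Char) (t : List Char)
    (h : ∀ d, t.head? = some d → PySem.Chars.lowerChar d ≠ lc) : runLenB lc t = 0 := by
  cases t with
  | nil => rfl
  | cons d t' => simp [runLenB, h d rfl]

-- the invariant under which specC and wordB agree: the pending previous character
-- (if any) lower-cases differently from the head
def InvP (p1 : Option Char) (s : List Char) : Prop :=
  ∀ a c, p1 = some a → s.head? = some c → PySem.Chars.lowerChar a ≠ PySem.Chars.lowerChar c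

lemma specC_eq_wordB_aux : ∀ (n : Nat) (s : List Char), s.length ≤ n →
    ∀ (p2 p1 : Option Char), InvP p1 s → specC p2 p1 s = wordB s := by
  intro n
  induction n with
  | zero =>
    intro s hs p2 p1 _
    cases s with
    | nil => simp [specC, wordB_nil]
    | cons c t => simp at hs
  | succ n ihn =>
    intro s hs p2 p1 hinv
    cases s with
    | nil => simp [specC, wordB_nil]
    | cons c t =>
      -- specC keeps the head c
      have hkeep : specC p2 p1 (c :: t) = c :: specC p1 (some c) t := by
        cases p1 with
        | none => simp [specC]
        | some a =>
          cases p2 with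
          | none => simp [specC]
          | some b =>
            have hne := hinv a c rfl rfl
            simp only [specC]
            rw [if_neg (by intro hh; exact hne hh.1.symm)]
      -- unfold wordB on c :: t
      have hk : runLenB (PySem.Chars.lowerChar c) (c :: t) =
          runLenB (PySem.Chars.lowerChar c) t + 1 := by
        rw [runLenB_cons, if_pos rfl]
      have hwB : wordB (c :: t) =
          c :: (t.take (min (runLenB (PySem.Chars.lowerChar c) t) 1) ++
                wordB (t.drop (runLenB (PySem.Chars.lowerChar c) t))) := by
        rw [wordB_cons, hk]
        have hmin : min (runLenB (PySem.Chars.lowerChar c) t + 1) 2 =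
            min (runLenB (PySem.Chars.lowerChar c) t) 1 + 1 := by omega
        rw [hmin]
        simp
      rw [hkeep, hwB]
      -- stage 2: inside a run with two pending run characters, specC drops the rest of the run
      have stage2 : ∀ (t2 : List Char), t2.length ≤ n → ∀ (a b : Char),
          PySem.Chars.lowerChar a = PySem.Chars.lowerChar b →
          specC (some b) (some a) t2 = wordB (t2.drop (runLenB (PySem.Chars.lowerChar a) t2)) := by
        intro t2
        induction t2 with
        | nil => intro _ a b _; simp [specC, wordB_nil]
        | cons d t3 ih3 =>
          intro hlen a b hab
          by_cases hd : PySem.Chars.lowerChar d = PySem.Chars.lowerChar a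
          · simp only [specC]
            rw [if_pos ⟨hd, hd ▸ hab⟩]
            rw [ih3 (by simp at hlen ⊢; omega) d a hd]
            rw [runLenB_cons, if_pos hd]
            simp [hd]
          · rw [runLenB_head_ne _ _ (by intro e he hle; simp at he; subst he; exact hd hle)]
            simp only [List.drop_zero]
            exact ihn (d :: t3) hlen (some b) (some a)
              (by intro x y hx hy; simp at hx hy; subst hx; subst hy; exact fun h => hd h.symm)
      -- stage 1: split on whether the run continues past c
      cases t with
      | nil => simp [specC, wordB_nil, runLenB]
      | cons c2 t2 =>
        by_cases hc2 : PySem.Chars.lowerChar c2 = PySem.Chars.lowerChar c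
        · -- run continues: c2 kept, rest of run dropped by stage 2
          have hkeep2 : specC p1 (some c) (c2 :: t2) = c2 :: specC (some c) (some c2) t2 := by
            cases p1 with
            | none => simp [specC]
            | some a =>
              have hne := hinv a c rfl rfl
              simp only [specC]
              rw [if_neg (by intro hh; exact hne (by rw [← hh.1, hh.2]))]
          rw [hkeep2]
          have hrl : runLenB (PySem.Chars.lowerChar c) (c2 :: t2) =
              runLenB (PySem.Chars.lowerChar c) t2 + 1 := by
            rw [runLenB_cons, if_pos hc2]
          rw [hrl]
          have hmin : min (runLenB (PySem.Chars.lowerChar c) t2 + 1) 1 = 1 := by omega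
          rw [hmin]
          have hst := stage2 t2 (by simp at hs; omega) c2 c hc2
          rw [hc2] at hst
          rw [hst]
          simp
        · -- run ends at c: nothing taken, invariant holds for the recursive call
          have hrl : runLenB (PySem.Chars.lowerChar c) (c2 :: t2) = 0 := by
            rw [runLenB_cons, if_neg hc2]
          rw [hrl]
          simp only [Nat.zero_min, List.take_zero, List.drop_zero, List.nil_append]
          exact congrArg (List.cons c) (ihn (c2 :: t2) (by simp at hs ⊢; omega) p1 (some c)
            (by intro x y hx hy; simp at hx hy; subst hx; subst hy; exact fun h => hc2 h.symm))

lemma wordA_eq_wordB (w : List Char) :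
    wordLoopA w [] (PySem.List.enumerate w 0) = wordB w := by
  have h := wordLoopA_eq_specC w [] []
  simp only [List.nil_append, List.length_nil, Nat.cast_zero] at h
  rw [h]
  simp only [List.dropLast_nil, List.getLast?_nil]
  exact specC_eq_wordB_aux w.length w le_rfl none none (by intro a c ha _; cases ha)

-- ===== VERDICT (by name: the statement is the Claim_ definition above) =====
theorem normalise_words_spec : Claim_equal_normalise_words := by
  intro sent _
  unfold Spec_normalise_words normalise_words normalise_words_alt
  congr 2
  exact List.map_congr_left (fun w _ => wordA_eq_wordB w)
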